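-- pv_equiv track=rewrite | github.com/dic-case-studies/casa6 | casatasks/src/tasks/task_imbaseline.py | __has_duplicate_nonnull_element
-- ===== SOURCE A (Python) =====
-- from collections import Counter
--
-- def __has_duplicate_nonnull_element(in_list):
--     #return True if in_list has duplicated elements other than ''
--     duplicates = [key for key, val in Counter(in_list).items() if val > 1]
--     len_duplicates = len(duplicates)
--
--     if (len_duplicates >= 2):
--         return True
--     elif (len_duplicates == 1):
--         return (duplicates[0] != '')
--     else: #len_duplicates == 0
--         return False
-- ===== SOURCE B (Python) =====
-- def __has_duplicate_nonnull_element(in_list):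
--     # single early-exit pass: report a repeat as soon as it is seen, ignoring repeats of ''
--     seen = set()
--     for x in in_list:
--         if x in seen and x != '':
--             return True
--         seen.add(x)
--     return False
-- ===== Notes on version B (the rewrite author's own statement) =====
-- stated objective: simpler
-- what changed: Replaces the Counter-build, duplicates-list comprehension and three-way length branch with a single early-exit scan over a growing seen set that returns True at the first repeated non-empty element.
import Mathlib
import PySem

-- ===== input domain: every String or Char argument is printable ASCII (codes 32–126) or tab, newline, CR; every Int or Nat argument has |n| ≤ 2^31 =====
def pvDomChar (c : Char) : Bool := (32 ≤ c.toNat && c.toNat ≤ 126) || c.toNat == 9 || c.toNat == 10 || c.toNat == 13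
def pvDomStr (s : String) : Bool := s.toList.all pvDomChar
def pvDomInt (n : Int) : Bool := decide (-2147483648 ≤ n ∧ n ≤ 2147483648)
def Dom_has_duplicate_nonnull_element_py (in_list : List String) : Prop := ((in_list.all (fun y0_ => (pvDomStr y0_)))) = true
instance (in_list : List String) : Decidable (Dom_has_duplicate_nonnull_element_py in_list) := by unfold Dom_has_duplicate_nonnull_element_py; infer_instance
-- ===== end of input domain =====

-- B replaces A's Counter + duplicates list + three-way length branch by one early-exit
-- scan with a seen set (objective: simpler); return values proved equal on the whole domain.

-- ===== PORT A =====
def has_duplicate_nonnull_element_py (in_list : List String) : Bool :=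
  let duplicates : List String :=
    (((PySem.Dict.counter in_list).items.filter (fun p => decide (1 < p.2))).map (fun p => p.1))
  let len_duplicates := duplicates.length
  if 2 ≤ len_duplicates then true
  else if len_duplicates = 1 then
    match PySem.List.pyGet? duplicates 0 with
    | some v => decide (v ≠ "")
    | none => false     -- unreachable: len_duplicates = 1
  else false

-- ===== PORT B =====
def has_duplicate_nonnull_element_py_altGo (seen : PySem.Set String) : List String → Bool
  | [] => false
  | x :: rest =>
    if PySem.Set.contains seen x && decide (x ≠ "") then true
    else has_duplicate_nonnull_element_py_altGo (PySem.Set.add seen x) rest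

def has_duplicate_nonnull_element_py_alt (in_list : List String) : Bool :=
  has_duplicate_nonnull_element_py_altGo PySem.Set.empty in_list

-- ===== PRECONDITION & SPEC =====
def Spec_has_duplicate_nonnull_element_py (in_list : List String) (out : Bool) : Prop := out = has_duplicate_nonnull_element_py_alt in_list
instance (in_list : List String) (out : Bool) : Decidable (Spec_has_duplicate_nonnull_element_py in_list out) := by unfold Spec_has_duplicate_nonnull_element_py; infer_instance

-- ===== CLAIM (what is proved, stated in full; the proofs are below) =====
def Claim_equal_has_duplicate_nonnull_element_py : Prop := ∀ (in_list : List String), Dom_has_duplicate_nonnull_element_py in_list → Spec_has_duplicate_nonnull_element_py in_list (has_duplicate_nonnull_element_py in_list)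

-- ===== LEMMAS AND PROOFS =====

-- B's loop invariant: it returns true iff some nonempty y repeats, counting an occurrence
-- in `seen` together with one in the remaining list, or two occurrences in the list itself.
theorem altGo_eq_true_iff (seen : PySem.Set String) (xs : List String) :
    has_duplicate_nonnull_element_py_altGo seen xs = true ↔
      ∃ y, y ≠ "" ∧ ((y ∈ seen ∧ y ∈ xs) ∨ 2 ≤ xs.count y) := by
  induction xs generalizing seen with
  | nil => simp [has_duplicate_nonnull_element_py_altGo]
  | cons x rest ih =>
    simp only [has_duplicate_nonnull_element_py_altGo]
    by_cases hx : x ∈ seen ∧ x ≠ ""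
    · have hcond : (PySem.Set.contains seen x && decide (x ≠ "")) = true := by
        simp [pysem, hx.1, hx.2]
      rw [hcond, if_pos rfl]
      constructor
      · intro _; exact ⟨x, hx.2, Or.inl ⟨hx.1, List.mem_cons_self⟩⟩
      · intro _; rfl
    · have hcond : (PySem.Set.contains seen x && decide (x ≠ "")) = false := by
        by_cases hmem : x ∈ seen
        · have hx'' : x = "" := by tauto
          simp [pysem, hx'']
        · simp [pysem, hmem]
      rw [hcond, if_neg (by simp), ih]
      constructor
      · rintro ⟨y, hy, hcase⟩
        refine ⟨y, hy, ?_⟩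
        rcases hcase with ⟨hmem, hrest⟩ | hcnt
        · rcases (PySem.Set.mem_add seen x y).mp hmem with h | h
          · exact Or.inl ⟨h, List.mem_cons_of_mem _ hrest⟩
          · subst h
            right
            have h1 : 1 ≤ rest.count y := List.count_pos_iff.mpr hrest
            rw [List.count_cons_self]; omega
        · right
          rw [List.count_cons]
          split <;> omega
      · rintro ⟨y, hy, hcase⟩
        refine ⟨y, hy, ?_⟩
        rcases hcase with ⟨hmem, hin⟩ | hcnt
        · rcases List.mem_cons.mp hin with h | h
          · exact absurd ⟨h ▸ hmem, h ▸ hy⟩ hx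
          · exact Or.inl ⟨(PySem.Set.mem_add seen x y).mpr (Or.inl hmem), h⟩
        · rw [List.count_cons] at hcnt
          by_cases hyx : y = x
          · rw [if_pos (by simp [hyx])] at hcnt
            have hrest : y ∈ rest := List.count_pos_iff.mp (by omega)
            exact Or.inl ⟨(PySem.Set.mem_add seen x y).mpr (Or.inr hyx), hrest⟩
          · rw [if_neg (by simp only [beq_iff_eq]; exact fun h => hyx h.symm)] at hcnt
            exact Or.inr (by omega)

theorem alt_eq_true_iff (xs : List String) :
    has_duplicate_nonnull_element_py_alt xs = true ↔ ∃ y, y ≠ "" ∧ 2 ≤ xs.count y := by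
  rw [has_duplicate_nonnull_element_py_alt, altGo_eq_true_iff]
  constructor
  · rintro ⟨y, hy, hc⟩
    refine ⟨y, hy, ?_⟩
    rcases hc with ⟨hmem, _⟩ | h
    · exact absurd hmem (by simp [PySem.Set.empty])
    · exact h
  · rintro ⟨y, hy, hc⟩; exact ⟨y, hy, Or.inr hc⟩

-- A's duplicates list is the dedup of xs filtered to elements with count ≥ 2.
theorem a_duplicates_eq (xs : List String) :
    (((PySem.Dict.counter xs).items.filter (fun p => decide (1 < p.2))).map (fun p => p.1)) =
      (PySem.Set.ofList xs).filter (fun k => decide (1 < (xs.count k : Int))) := by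
  rw [PySem.Dict.items_counter, List.filter_map, List.map_map]
  simp [Function.comp_def]

theorem a_eq_true_iff (xs : List String) :
    has_duplicate_nonnull_element_py xs = true ↔ ∃ y, y ≠ "" ∧ 2 ≤ xs.count y := by
  rw [has_duplicate_nonnull_element_py]
  simp only [a_duplicates_eq]
  set dl := (PySem.Set.ofList xs).filter (fun k => decide (1 < (xs.count k : Int))) with hdl
  have hnd : dl.Nodup := (PySem.Set.nodup_ofList xs).filter _
  have hmem : ∀ y, y ∈ dl ↔ 2 ≤ xs.count y := by
    intro y
    rw [hdl, List.mem_filter, PySem.Set.mem_ofList]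
    constructor
    · rintro ⟨_, h⟩; simp at h; omega
    · intro h
      exact ⟨List.count_pos_iff.mp (by omega), by simp; omega⟩
  have hiff : (∃ y, y ≠ "" ∧ 2 ≤ xs.count y) ↔ ∃ y ∈ dl, y ≠ "" := by
    constructor
    · rintro ⟨y, hy, hc⟩; exact ⟨y, (hmem y).mpr hc, hy⟩
    · rintro ⟨y, hy, hne⟩; exact ⟨y, hne, (hmem y).mp hy⟩
  rw [hiff]
  match dl, hnd with
  | [], _ => simp
  | [a], _ => simp [PySem.List.pyGet?, PySem.List.pyIdx?]
  | a :: b :: t, hnd =>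
    have hab : a ≠ b := by simp [List.nodup_cons] at hnd; tauto
    simp only [List.length_cons, if_pos (by omega : 2 ≤ t.length + 1 + 1)]
    constructor
    · intro _
      by_cases ha : a = ""
      · exact ⟨b, by simp, by rw [ha] at hab; exact fun h => hab h.symm⟩
      · exact ⟨a, by simp, ha⟩
    · intro _; trivial

-- ===== VERDICT (by name: the statement is the Claim_ definition above) =====
theorem has_duplicate_nonnull_element_py_spec : Claim_equal_has_duplicate_nonnull_element_py := by
  intro xs _
  unfold Spec_has_duplicate_nonnull_element_py
  have := (a_eq_true_iff xs).trans (alt_eq_true_iff xs).symm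
  rcases Bool.eq_false_or_eq_true (has_duplicate_nonnull_element_py_alt xs) with h | h <;>
    rcases Bool.eq_false_or_eq_true (has_duplicate_nonnull_element_py xs) with h2 | h2 <;>
    simp_all
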